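-- pv_equiv track=rewrite | github.com/Arsen1302/Code-copy-detector | TestData/solutions/problem_1270_1_1.py | solution_1270_1_1
-- ===== SOURCE A (Python) =====
-- def solution_1270_1_1(s: str) -> int:
--     ones = s.count("1")
--     zeros = len(s) - ones
--     if abs(ones - zeros) > 1: return -1 # impossible
--
--     def solution_1270_1_2(x):
--         """Return number of swaps if string starts with x."""
--         ans = 0
--         for c in s:
--             if c != x: ans += 1
--             x = "1" if x == "0" else "0"
--         return ans//2
--
--     if ones > zeros: return solution_1270_1_2("1")
--     elif ones < zeros: return solution_1270_1_2("0")
--     else: return min(solution_1270_1_2("0"), solution_1270_1_2("1"))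
-- ===== SOURCE B (Python) =====
-- def solution_1270_1_1(s: str) -> int:
--     ones = s.count("1")
--     zeros = len(s) - ones
--     if abs(ones - zeros) > 1: return -1  # impossible
--     # one pass: histogram of '0'/'1' by index parity
--     e0 = e1 = o0 = o1 = 0
--     even = True
--     for c in s:
--         if even:
--             if c == "0": e0 += 1
--             elif c == "1": e1 += 1
--         else:
--             if c == "0": o0 += 1
--             elif c == "1": o1 += 1
--         even = not even
--     even_len = (len(s) + 1) // 2
--     odd_len = len(s) // 2
--     m0 = (even_len - e0) + (odd_len - o1)  # mismatches vs pattern "0101..."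
--     m1 = (even_len - e1) + (odd_len - o0)  # mismatches vs pattern "1010..."
--     if ones > zeros: return m1 // 2
--     if ones < zeros: return m0 // 2
--     return min(m0 // 2, m1 // 2)
-- ===== Notes on version B (the rewrite author's own statement) =====
-- stated objective: alternative
-- what changed: A simulates the alternating pattern with a toggle variable once per candidate pattern (up to three passes over s besides the count); B makes one histogram pass counting zero- and one-characters per index parity and gets each pattern's mismatch count in closed form from the four counters and the parity lengths.
import Mathlib
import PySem

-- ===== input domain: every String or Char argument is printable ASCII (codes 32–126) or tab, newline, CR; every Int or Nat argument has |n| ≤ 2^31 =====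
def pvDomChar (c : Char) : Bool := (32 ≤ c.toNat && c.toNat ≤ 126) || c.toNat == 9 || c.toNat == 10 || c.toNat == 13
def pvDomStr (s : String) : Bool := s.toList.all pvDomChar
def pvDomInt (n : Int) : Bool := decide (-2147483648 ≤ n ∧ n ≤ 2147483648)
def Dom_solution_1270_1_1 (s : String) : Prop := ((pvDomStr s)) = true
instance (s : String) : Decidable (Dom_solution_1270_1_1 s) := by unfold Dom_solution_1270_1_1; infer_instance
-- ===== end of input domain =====

-- B replaces A's per-pattern mismatch-toggle simulation (up to three passes over s)
-- with a single parity histogram pass plus closed-form mismatch counts; objective: alternative.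


-- ===== PORT A =====
-- inner helper solution_1270_1_2: 'ans=0; for c in s: if c != x: ans += 1; x = toggle(x); return ans//2'
def pvAHelper (s : List Char) (x : Char) : Int :=
  PySem.Int.floordiv
    ((s.foldl (fun (st : Int × Char) c =>
        (if c ≠ st.2 then st.1 + 1 else st.1, if st.2 = '0' then '1' else '0')) (0, x)).1)
    2

def solution_1270_1_1 (s : String) : Int :=
  let ones : Int := PySem.Str.count s "1"
  let zeros : Int := PySem.Str.len s - ones
  if |ones - zeros| > 1 then -1
  else if ones > zeros then pvAHelper s.toList '1'
  else if ones < zeros then pvAHelper s.toList '0'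
  else min (pvAHelper s.toList '0') (pvAHelper s.toList '1')

-- ===== PORT B =====
-- one pass: zero/one histogram by index parity (e0,e1,o0,o1,even)
def pvBStep (st : Int × Int × Int × Int × Bool) (c : Char) : Int × Int × Int × Int × Bool :=
  let (e0, e1, o0, o1, ev) := st
  if ev then
    (if c = '0' then (e0 + 1, e1, o0, o1, false)
     else if c = '1' then (e0, e1 + 1, o0, o1, false)
     else (e0, e1, o0, o1, false))
  else
    (if c = '0' then (e0, e1, o0 + 1, o1, true)
     else if c = '1' then (e0, e1, o0, o1 + 1, true)
     else (e0, e1, o0, o1, true))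

def solution_1270_1_1_alt (s : String) : Int :=
  let ones : Int := PySem.Str.count s "1"
  let n : Int := PySem.Str.len s
  let zeros : Int := n - ones
  if |ones - zeros| > 1 then -1
  else
    let q := s.toList.foldl pvBStep (0, 0, 0, 0, true)
    let e0 := q.1; let e1 := q.2.1; let o0 := q.2.2.1; let o1 := q.2.2.2.1
    let evenLen : Int := PySem.Int.floordiv (n + 1) 2
    let oddLen : Int := PySem.Int.floordiv n 2
    let m0 := (evenLen - e0) + (oddLen - o1)
    let m1 := (evenLen - e1) + (oddLen - o0)
    if ones > zeros then PySem.Int.floordiv m1 2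
    else if ones < zeros then PySem.Int.floordiv m0 2
    else min (PySem.Int.floordiv m0 2) (PySem.Int.floordiv m1 2)

-- ===== PRECONDITION & SPEC =====
def Spec_solution_1270_1_1 (s : String) (out : Int) : Prop := out = solution_1270_1_1_alt s
instance (s : String) (out : Int) : Decidable (Spec_solution_1270_1_1 s out) := by unfold Spec_solution_1270_1_1; infer_instance

-- ===== CLAIM (what is proved, stated in full; the proofs are below) =====
def Claim_equal_solution_1270_1_1 : Prop := ∀ (s : String), Dom_solution_1270_1_1 s → Spec_solution_1270_1_1 s (solution_1270_1_1 s)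

-- ===== LEMMAS AND PROOFS =====

-- mismatch count of l against the alternating pattern starting with x
def pvMism : List Char → Char → Int
  | [], _ => 0
  | c :: cs, x => (if c ≠ x then 1 else 0) + pvMism cs (if x = '0' then '1' else '0')

theorem pvALoop_eq (l : List Char) : ∀ (x : Char) (a : Int),
    (l.foldl (fun (st : Int × Char) c =>
        (if c ≠ st.2 then st.1 + 1 else st.1, if st.2 = '0' then '1' else '0')) (a, x)).1
      = a + pvMism l x := by
  induction l with
  | nil => intro x a; simp [pvMism]
  | cons c cs ih =>
    intro x a
    simp only [List.foldl_cons, pvMism]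
    rw [ih]
    split <;> ring

theorem pvAHelper_eq (l : List Char) (x : Char) :
    pvAHelper l x = PySem.Int.floordiv (pvMism l x) 2 := by
  unfold pvAHelper
  rw [pvALoop_eq]
  simp

-- the parity counters as structural recursion with explicit starting parity
def pvQuad : List Char → Bool → Int × Int × Int × Int
  | [], _ => (0, 0, 0, 0)
  | c :: cs, true =>
    ((pvQuad cs false).1 + (if c = '0' then 1 else 0),
     (pvQuad cs false).2.1 + (if c = '1' then 1 else 0),
     (pvQuad cs false).2.2.1, (pvQuad cs false).2.2.2)
  | c :: cs, false =>
    ((pvQuad cs true).1, (pvQuad cs true).2.1,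
     (pvQuad cs true).2.2.1 + (if c = '0' then 1 else 0),
     (pvQuad cs true).2.2.2 + (if c = '1' then 1 else 0))

def pvParity : List Char → Bool → Bool
  | [], b => b
  | _ :: cs, b => pvParity cs (!b)

theorem pvFold_eq (l : List Char) : ∀ (b : Bool) (a0 a1 a2 a3 : Int),
    l.foldl pvBStep (a0, a1, a2, a3, b)
      = (a0 + (pvQuad l b).1, a1 + (pvQuad l b).2.1, a2 + (pvQuad l b).2.2.1,
         a3 + (pvQuad l b).2.2.2, pvParity l b) := by
  induction l with
  | nil => intro b a0 a1 a2 a3; simp [pvQuad, pvParity]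
  | cons c cs ih =>
    intro b a0 a1 a2 a3
    simp only [List.foldl_cons, pvBStep]
    cases b <;> by_cases h0 : c = '0' <;> by_cases h1 : c = '1' <;>
      simp [h0, h1, pvQuad, pvParity, ih, Prod.ext_iff] <;> omega

-- number of even / odd indices of l
def pvEL (l : List Char) : Int := ((l.length + 1) / 2 : Nat)
def pvOL (l : List Char) : Int := ((l.length / 2 : Nat) : Int)

theorem pvEL_cons (c : Char) (cs : List Char) : pvEL (c :: cs) = pvOL cs + 1 := by
  simp [pvEL, pvOL, List.length_cons]; omega

theorem pvOL_cons (c : Char) (cs : List Char) : pvOL (c :: cs) = pvEL cs := by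
  simp [pvEL, pvOL, List.length_cons]

-- core: closed-form mismatch counts from the parity histogram (both starting parities at once)
theorem pvCore (l : List Char) :
    ((pvEL l - (pvQuad l true).1) + (pvOL l - (pvQuad l true).2.2.2) = pvMism l '0'
     ∧ (pvEL l - (pvQuad l true).2.1) + (pvOL l - (pvQuad l true).2.2.1) = pvMism l '1')
    ∧ ((pvOL l - (pvQuad l false).1) + (pvEL l - (pvQuad l false).2.2.2) = pvMism l '1'
     ∧ (pvOL l - (pvQuad l false).2.1) + (pvEL l - (pvQuad l false).2.2.1) = pvMism l '0') := by
  induction l with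
  | nil => simp [pvQuad, pvMism, pvEL, pvOL]
  | cons c cs ih =>
    obtain ⟨⟨t0, t1⟩, ⟨f1, f0⟩⟩ := ih
    refine ⟨⟨?_, ?_⟩, ?_, ?_⟩ <;>
      · simp only [pvQuad, pvMism, pvEL_cons, pvOL_cons]
        by_cases h0 : c = '0' <;> by_cases h1 : c = '1' <;>
          simp [h0, h1] <;> omega

theorem pvFloorTwo (n : Nat) : PySem.Int.floordiv ((n : Int)) 2 = ((n / 2 : Nat) : Int) := by
  exact_mod_cast PySem.Int.floordiv_natCast n 2

-- ===== VERDICT (by name: the statement is the Claim_ definition above) =====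
theorem solution_1270_1_1_spec : Claim_equal_solution_1270_1_1 := by
  intro s _
  show solution_1270_1_1 s = solution_1270_1_1_alt s
  unfold solution_1270_1_1 solution_1270_1_1_alt
  simp only [PySem.Str.len]
  obtain ⟨⟨t0, t1⟩, _⟩ := pvCore s.toList
  have hq := pvFold_eq s.toList true 0 0 0 0
  have hE : PySem.Int.floordiv ((s.toList.length : Int) + 1) 2 = pvEL s.toList := by
    have h : ((s.toList.length : Int) + 1) = ((s.toList.length + 1 : Nat) : Int) := by push_cast; ring
    rw [h, pvFloorTwo]; rfl
  have hO : PySem.Int.floordiv ((s.toList.length : Int)) 2 = pvOL s.toList := by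
    rw [pvFloorTwo]; rfl
  have hm1 : (pvEL s.toList - (s.toList.foldl pvBStep (0,0,0,0,true)).2.1)
      + (pvOL s.toList - (s.toList.foldl pvBStep (0,0,0,0,true)).2.2.1) = pvMism s.toList '1' := by
    rw [hq]; simpa using t1
  have hm0 : (pvEL s.toList - (s.toList.foldl pvBStep (0,0,0,0,true)).1)
      + (pvOL s.toList - (s.toList.foldl pvBStep (0,0,0,0,true)).2.2.2.1) = pvMism s.toList '0' := by
    rw [hq]; simpa using t0
  simp only [hE, hO, pvAHelper_eq]
  split
  · rfl
  · split
    · rw [← hm1]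
    · split
      · rw [← hm0]
      · rw [← hm0, ← hm1]
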